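-- pv_equiv track=rewrite | github.com/DHLab-nl/Detecting-Smell-Experiences-in-Novels | 6_Evaluation/gold_standard/precision_recall_stats.py | get_group_predictions
-- ===== SOURCE A (Python) =====
-- from collections import defaultdict
--
-- def get_group_predictions(patterns, outcomes_d):
--     """
--     patterns (list): [pattern_abstraction,...] iter
--     outcomes_d (dict): {pattern_abstraction:[**]}
--
--     Returns: {extract_index:group_outcomes}
--     """
--     num_sentences = len(list(outcomes_d.items())[0][1])
--
--     group_outcomes = defaultdict()
--     for index in range(num_sentences):
--         for pattern_abstraction, outcomes in outcomes_d.items():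
--
--             if pattern_abstraction in patterns:
--                 pattern_outcome = outcomes[index]
--
--                 # case: we have a pattern match
--                 if pattern_outcome == "TP":
--                     group_outcomes[str(index)] = "TP"
--                     break  # group pred. is pos with single match ... stop looking
--                 elif pattern_outcome == "FP":
--                     group_outcomes[str(index)] = "FP"
--                     break
--
--                 # case: we don't have a match
--                 group_outcomes[str(index)] = pattern_outcome
--
--     return group_outcomes
-- ===== SOURCE B (Python) =====
-- from collections import defaultdict
--
-- def get_group_predictions(patterns, outcomes_d):
--     """Column-wise pass: iterate patterns outer, sentences inner, with a
--     'finalized' set replacing A's inner break (first TP/FP wins, else last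
--     matching pattern's outcome wins)."""
--     num_sentences = len(next(iter(outcomes_d.values())))
--
--     group_outcomes = defaultdict()
--     finalized = set()
--     for pattern_abstraction, outcomes in outcomes_d.items():
--         if pattern_abstraction not in patterns:
--             continue
--         for index in range(num_sentences):
--             if index in finalized:
--                 continue
--             outcome = outcomes[index]
--             group_outcomes[str(index)] = outcome
--             if outcome == "TP" or outcome == "FP":
--                 finalized.add(index)
--     return group_outcomes
-- ===== Notes on version B (the rewrite author's own statement) =====
-- stated objective: faster
-- what changed: A scans index-outer/pattern-inner with break; B scans pattern-outer/index-inner in one column-wise pass per matching pattern, maintaining a 'finalized' set of indices instead of breaking, so a finalized index costs one O(1) set check per pattern instead of A re-walking the pattern prefix for every index.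
import Mathlib
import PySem

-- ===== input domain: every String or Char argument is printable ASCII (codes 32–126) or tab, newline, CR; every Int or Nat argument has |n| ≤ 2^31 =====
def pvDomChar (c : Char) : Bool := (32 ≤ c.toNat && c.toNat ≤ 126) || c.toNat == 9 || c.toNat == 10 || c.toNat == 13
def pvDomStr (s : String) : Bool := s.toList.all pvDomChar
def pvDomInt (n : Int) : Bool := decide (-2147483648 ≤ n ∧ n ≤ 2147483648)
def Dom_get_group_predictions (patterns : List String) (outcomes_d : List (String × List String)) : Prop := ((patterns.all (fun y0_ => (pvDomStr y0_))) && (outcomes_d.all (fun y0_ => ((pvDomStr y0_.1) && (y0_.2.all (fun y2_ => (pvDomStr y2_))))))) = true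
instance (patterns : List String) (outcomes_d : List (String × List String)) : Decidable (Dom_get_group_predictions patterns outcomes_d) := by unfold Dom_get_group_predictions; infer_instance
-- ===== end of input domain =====

-- B transposes A's loops (pattern-outer, index-inner) and replaces the inner 'break'
-- with a maintained 'finalized' set of indices (measured faster by a constant factor).

-- ===== PORT A =====
-- inner 'for pattern_abstraction, outcomes in outcomes_d.items(): …' with break
def pvAInner (patterns : List String) (index : Nat) :
    List (String × List String) → PySem.Dict String String → PySem.Dict String String
  | [], d => d
  | (pattern_abstraction, outcomes) :: rest, d =>
    if patterns.contains pattern_abstraction then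
      match PySem.List.pyGet? outcomes (index : Int) with
      | none => d  -- IndexError in Python; excluded by Pre_
      | some pattern_outcome =>
        if pattern_outcome == "TP" then d.insert (PySem.Int.toStr (index : Int)) "TP"
        else if pattern_outcome == "FP" then d.insert (PySem.Int.toStr (index : Int)) "FP"
        else pvAInner patterns index rest (d.insert (PySem.Int.toStr (index : Int)) pattern_outcome)
    else pvAInner patterns index rest d

def get_group_predictions (patterns : List String) (outcomes_d : List (String × List String)) : List (String × String) :=
  match outcomes_d with
  | [] => []  -- Python raises IndexError on list(outcomes_d.items())[0]; excluded by Pre_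
  | (_, v0) :: _ =>
    ((List.range v0.length).foldl
      (fun d index => pvAInner patterns index outcomes_d d) PySem.Dict.empty).items

-- ===== PORT B =====
-- one step of B's inner 'for index in range(num_sentences)' loop
def pvBStep (outcomes : List String)
    (st : PySem.Dict String String × PySem.Set Nat) (index : Nat) :
    PySem.Dict String String × PySem.Set Nat :=
  if PySem.Set.contains st.2 index then st
  else
    match PySem.List.pyGet? outcomes (index : Int) with
    | none => st  -- IndexError in Python; excluded by Pre_
    | some outcome =>
      let d := st.1.insert (PySem.Int.toStr (index : Int)) outcome
      if outcome == "TP" || outcome == "FP" then (d, PySem.Set.add st.2 index) else (d, st.2)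

def pvBInner (num_sentences : Nat) (outcomes : List String)
    (st : PySem.Dict String String × PySem.Set Nat) :
    PySem.Dict String String × PySem.Set Nat :=
  (List.range num_sentences).foldl (pvBStep outcomes) st

def get_group_predictions_alt (patterns : List String) (outcomes_d : List (String × List String)) : List (String × String) :=
  match outcomes_d with
  | [] => []  -- Python raises StopIteration on next(iter(…)); excluded by Pre_
  | (_, v0) :: _ =>
    (outcomes_d.foldl
      (fun st p => if patterns.contains p.1 then pvBInner v0.length p.2 st else st)
      (PySem.Dict.empty, (PySem.Set.empty : PySem.Set Nat))).1.items

-- ===== PRECONDITION & SPEC =====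
-- the dict entries whose key is in patterns, in dict order (used only to state Pre_)
def pvEs (patterns : List String) (outcomes_d : List (String × List String)) : List (String × List String) :=
  outcomes_d.filter (fun p => patterns.contains p.1)

-- Pre_ excludes exactly the inputs on which A raises IndexError: the empty dict, and
-- dicts where at some index i < num_sentences a matching entry's outcome list is too
-- short without an earlier matching entry stopping the scan with "TP"/"FP" at i.
def Pre_get_group_predictions (patterns : List String) (outcomes_d : List (String × List String)) : Prop :=
  outcomes_d ≠ [] ∧
  ∀ i < (outcomes_d.headI).2.length,
    ∀ j < (pvEs patterns outcomes_d).length,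
      ((pvEs patterns outcomes_d)[j]!).2.length ≤ i →
      ∃ j' < j, i < ((pvEs patterns outcomes_d)[j']!).2.length ∧
        (((pvEs patterns outcomes_d)[j']!).2.getD i "" = "TP" ∨
         ((pvEs patterns outcomes_d)[j']!).2.getD i "" = "FP")
instance (patterns : List String) (outcomes_d : List (String × List String)) : Decidable (Pre_get_group_predictions patterns outcomes_d) := by unfold Pre_get_group_predictions; infer_instance

def pvWitness_get_group_predictions : List String × (List (String × List String)) :=
  (["p"], [("p", ["TP", "x"]), ("q", ["FP"])])

def Spec_get_group_predictions (patterns : List String) (outcomes_d : List (String × List String)) (out : List (String × String)) : Prop := out = get_group_predictions_alt patterns outcomes_d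
instance (patterns : List String) (outcomes_d : List (String × List String)) (out : List (String × String)) : Decidable (Spec_get_group_predictions patterns outcomes_d out) := by unfold Spec_get_group_predictions; infer_instance

-- ===== CLAIM (what is proved, stated in full; the proofs are below) =====
def Claim_equal_get_group_predictions : Prop := ∀ (patterns : List String) (outcomes_d : List (String × List String)), Dom_get_group_predictions patterns outcomes_d → Pre_get_group_predictions patterns outcomes_d → Spec_get_group_predictions patterns outcomes_d (get_group_predictions patterns outcomes_d)

-- ===== LEMMAS AND PROOFS =====

-- small Bool/ite helpers
lemma pvBfalse {b : Bool} (h : ¬ b = true) : b = false := by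
  cases b
  · rfl
  · exact absurd rfl h

lemma pvIfB_pos {α : Type} {b : Bool} (h : b = true) (x y : α) :
    (if b = true then x else y) = x := if_pos h

lemma pvIfB_neg {α : Type} {b : Bool} (h : b = false) (x y : α) :
    (if b = true then x else y) = y := if_neg (by simp [h])

-- ---- decimal representation: str(i) is injective on ℕ ----
def pvParse (cs : List Char) : Nat := cs.foldl (fun a c => 10 * a + (c.toNat - 48)) 0

lemma pvParse_append_singleton (cs : List Char) (c : Char) :
    pvParse (cs ++ [c]) = 10 * pvParse cs + (c.toNat - 48) := by
  simp [pvParse]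

lemma pvToDigitsCore_append (b f : Nat) : ∀ (n : Nat) (l : List Char),
    Nat.toDigitsCore b f n l = Nat.toDigitsCore b f n [] ++ l := by
  induction f with
  | zero => intro n l; simp [Nat.toDigitsCore]
  | succ f ih =>
    intro n l
    simp only [Nat.toDigitsCore]
    by_cases h : n / b = 0
    · simp [h]
    · simp only [if_neg h]
      rw [ih (n / b) ((n % b).digitChar :: l), ih (n / b) [(n % b).digitChar]]
      simp

lemma pvDigitChar_toNat (k : Nat) (h : k < 10) : (Nat.digitChar k).toNat - 48 = k := by
  interval_cases k <;> decide

lemma pvParse_toDigitsCore (f : Nat) : ∀ (n : Nat), n < f →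
    pvParse (Nat.toDigitsCore 10 f n []) = n := by
  induction f with
  | zero => intro n h; omega
  | succ f ih =>
    intro n h
    by_cases h0 : n / 10 = 0
    · have hn : n < 10 := by omega
      have h1 : Nat.toDigitsCore 10 (f + 1) n [] = [(n % 10).digitChar] := by
        simp [Nat.toDigitsCore, h0]
      rw [h1]
      have h2 : pvParse [(n % 10).digitChar] = n % 10 := by
        simp [pvParse, pvDigitChar_toNat (n % 10) (Nat.mod_lt _ (by norm_num))]
      rw [h2, Nat.mod_eq_of_lt hn]
    · have h1 : Nat.toDigitsCore 10 (f + 1) n []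
          = Nat.toDigitsCore 10 f (n / 10) [(n % 10).digitChar] := by
        simp [Nat.toDigitsCore, h0]
      have hdiv : n / 10 < f := by
        have h1' : 0 < n := by
          by_contra hc
          have : n = 0 := by omega
          simp [this] at h0
        have := Nat.div_lt_self h1' (by norm_num : 1 < 10)
        omega
      rw [h1, pvToDigitsCore_append, pvParse_append_singleton, ih (n / 10) hdiv,
        pvDigitChar_toNat (n % 10) (Nat.mod_lt _ (by norm_num))]
      omega

lemma pvParse_toDigits (n : Nat) : pvParse (Nat.toDigits 10 n) = n :=
  pvParse_toDigitsCore (n + 1) n (Nat.lt_succ_self n)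

lemma pvToStr_inj (i j : Nat)
    (h : PySem.Int.toStr (i : Int) = PySem.Int.toStr (j : Int)) : i = j := by
  have hc : PySem.Int.toChars (i : Int) = PySem.Int.toChars (j : Int) := by
    have := congrArg String.toList h
    simpa [PySem.Int.toList_toStr] using this
  have hi : PySem.Int.toChars (i : Int) = Nat.toDigits 10 i := by
    simp [PySem.Int.toChars]
  have hj : PySem.Int.toChars (j : Int) = Nat.toDigits 10 j := by
    simp [PySem.Int.toChars]
  have := congrArg pvParse (hi ▸ hj ▸ hc)
  simpa [pvParse_toDigits] using this

lemma pvToStr_beq (i j : Nat) :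
    (PySem.Int.toStr (i : Int) == PySem.Int.toStr (j : Int)) = decide (i = j) := by
  by_cases h : i = j
  · simp [h]
  · simp [h]
    intro hc
    exact h (pvToStr_inj i j hc)

lemma pvKeys_nodup (n : Nat) :
    ((List.range n).map (fun i : Nat => PySem.Int.toStr (i : Int))).Nodup := by
  refine List.Nodup.map ?_ List.nodup_range
  intro a b h
  exact pvToStr_inj a b h

-- ---- row semantics shared by both proofs ----
def pvOut (p : String × List String) (i : Nat) : String := p.2.getD i ""

def pvStop (o : String) : Bool := o == "TP" || o == "FP"

def pvRow : List (String × List String) → Nat → Option String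
  | [], _ => none
  | e :: rest, i =>
    if pvStop (pvOut e i) then some (pvOut e i)
    else
      match pvRow rest i with
      | some w => some w
      | none => some (pvOut e i)

def pvVal (es : List (String × List String)) (i : Nat) : String := (pvRow es i).getD ""

def pvStopped (es : List (String × List String)) (i : Nat) : Bool :=
  es.any (fun e => pvStop (pvOut e i))

-- column i does not raise: the scan of the matching entries meets "TP"/"FP" or
-- exhausts them before any too-short outcome list is indexed
def pvColOK : List (String × List String) → Nat → Bool
  | [], _ => true
  | e :: rest, i => if e.2.length ≤ i then false else (pvStop (pvOut e i) || pvColOK rest i)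

lemma pvRow_cons (x : String × List String) (rest : List (String × List String)) (i : Nat) :
    pvRow (x :: rest) i =
      if pvStop (pvOut x i) then some (pvOut x i)
      else
        match pvRow rest i with
        | some w => some w
        | none => some (pvOut x i) := rfl

lemma pvRow_single (e : String × List String) (i : Nat) :
    pvRow [e] i = some (pvOut e i) := by
  rw [pvRow_cons]
  by_cases hs : pvStop (pvOut e i) = true
  · rw [pvIfB_pos hs]
  · rw [pvIfB_neg (pvBfalse hs)]
    simp [pvRow]

lemma pvRow_isSome (es : List (String × List String)) (i : Nat) (h : es ≠ []) :
    (pvRow es i).isSome := by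
  match es with
  | e :: rest =>
    rw [pvRow_cons]
    by_cases hs : pvStop (pvOut e i) = true
    · rw [pvIfB_pos hs]; rfl
    · rw [pvIfB_neg (pvBfalse hs)]
      cases hr : pvRow rest i <;> simp

lemma pvRow_eq_some (es : List (String × List String)) (i : Nat) (h : es ≠ []) :
    pvRow es i = some (pvVal es i) := by
  have h2 := pvRow_isSome es i h
  cases hr : pvRow es i with
  | none => rw [hr] at h2; simp at h2
  | some w => simp only [pvVal, hr, Option.getD_some]

lemma pvVal_append (es : List (String × List String)) (e : String × List String) (i : Nat)
    (h : es ≠ []) :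
    pvVal (es ++ [e]) i = if pvStopped es i then pvVal es i else pvOut e i := by
  induction es with
  | nil => exact absurd rfl h
  | cons x rest ih =>
    by_cases hs : pvStop (pvOut x i) = true
    · have h3 : pvStopped (x :: rest) i = true := by
        simp [pvStopped, List.any_cons, hs]
      rw [pvIfB_pos h3]
      have h1 : pvRow ((x :: rest) ++ [e]) i = some (pvOut x i) := by
        rw [List.cons_append, pvRow_cons, pvIfB_pos hs]
      have h2 : pvRow (x :: rest) i = some (pvOut x i) := by
        rw [pvRow_cons, pvIfB_pos hs]
      simp only [pvVal, h1, h2]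
    · have hf := pvBfalse hs
      have hst : pvStopped (x :: rest) i = pvStopped rest i := by
        simp [pvStopped, List.any_cons, hf]
      by_cases hr : rest = []
      · subst hr
        have h3 : pvStopped ([x] : List (String × List String)) i = false := by
          simp [pvStopped, List.any_cons, hf]
        rw [pvIfB_neg h3]
        have heq : ([x] ++ [e] : List (String × List String)) = x :: [e] := rfl
        have h1 : pvRow ([x] ++ [e]) i = some (pvOut e i) := by
          rw [heq, pvRow_cons, pvIfB_neg hf, pvRow_single]
        simp only [pvVal, h1, Option.getD_some]
      · have hrowe := pvRow_eq_some (rest ++ [e]) i (by simp)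
        have hrowr := pvRow_eq_some rest i hr
        have l1 : pvVal ((x :: rest) ++ [e]) i = pvVal (rest ++ [e]) i := by
          simp only [pvVal]
          rw [List.cons_append, pvRow_cons, pvIfB_neg hf, hrowe]
        have l2 : pvVal (x :: rest) i = pvVal rest i := by
          simp only [pvVal]
          rw [pvRow_cons, pvIfB_neg hf, hrowr]
        rw [l1, hst, l2]
        exact ih hr

lemma pvStopped_append (es : List (String × List String)) (e : String × List String) (i : Nat) :
    pvStopped (es ++ [e]) i = (pvStopped es i || pvStop (pvOut e i)) := by
  simp [pvStopped]

-- ---- pvColOK: bridge from Pre_'s quantifier form, and structural facts ----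
lemma pvPre_to_colOK (i : Nat) : ∀ (cs : List (String × List String)),
    (∀ j < cs.length, (cs[j]!).2.length ≤ i →
      ∃ j' < j, i < (cs[j']!).2.length ∧
        ((cs[j']!).2.getD i "" = "TP" ∨ (cs[j']!).2.getD i "" = "FP")) →
    pvColOK cs i = true := by
  intro cs
  induction cs with
  | nil => intro _; rfl
  | cons e rest ih =>
    intro h
    have hlong : i < e.2.length := by
      by_contra hc
      obtain ⟨j', hj', _⟩ := h 0 (by simp) (by
        rw [List.getElem!_cons_zero]; omega)
      omega
    show (if e.2.length ≤ i then false else (pvStop (pvOut e i) || pvColOK rest i)) = true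
    rw [if_neg (by omega)]
    by_cases hs : pvStop (pvOut e i) = true
    · simp [hs]
    · have hne : ¬ pvOut e i = "TP" ∧ ¬ pvOut e i = "FP" := by
        simpa [pvStop] using hs
      have hrest : pvColOK rest i = true := by
        apply ih
        intro j hj hshort
        obtain ⟨j', hj', hlong', hval⟩ := h (j + 1) (by simp; omega) (by
          rwa [List.getElem!_cons_succ])
        match j' with
        | 0 =>
          exfalso
          rw [List.getElem!_cons_zero] at hval
          rcases hval with hv | hv
          · exact hne.1 hv
          · exact hne.2 hv
        | Nat.succ k =>
          refine ⟨k, by omega, ?_, ?_⟩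
          · rwa [List.getElem!_cons_succ] at hlong'
          · rwa [List.getElem!_cons_succ] at hval
      simp [hrest]

lemma pvColOK_append_left (e : String × List String) (i : Nat) :
    ∀ (xs : List (String × List String)),
    pvColOK (xs ++ [e]) i = true → pvColOK xs i = true := by
  intro xs
  induction xs with
  | nil => intro _; rfl
  | cons x rest ih =>
    intro h
    have h' : (if x.2.length ≤ i then false
        else (pvStop (pvOut x i) || pvColOK (rest ++ [e]) i)) = true := h
    by_cases hl : x.2.length ≤ i
    · rw [if_pos hl] at h'; exact absurd h' (by simp)
    · rw [if_neg hl] at h'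
      show (if x.2.length ≤ i then false else (pvStop (pvOut x i) || pvColOK rest i)) = true
      rw [if_neg hl]
      rcases Bool.or_eq_true_iff.mp h' with hs | hc
      · simp [hs]
      · simp [ih hc]

lemma pvColOK_last (e : String × List String) (i : Nat) :
    ∀ (xs : List (String × List String)),
    pvColOK (xs ++ [e]) i = true → pvStopped xs i = false → i < e.2.length := by
  intro xs
  induction xs with
  | nil =>
    intro h _
    have h' : (if e.2.length ≤ i then false
        else (pvStop (pvOut e i) || pvColOK [] i)) = true := h
    by_cases hl : e.2.length ≤ i
    · rw [if_pos hl] at h'; exact absurd h' (by simp)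
    · omega
  | cons x rest ih =>
    intro h hst
    have h' : (if x.2.length ≤ i then false
        else (pvStop (pvOut x i) || pvColOK (rest ++ [e]) i)) = true := h
    have hs : pvStop (pvOut x i) = false := by
      have := hst
      simp only [pvStopped, List.any_cons, Bool.or_eq_false_iff] at this
      exact this.1
    have hrest : pvStopped rest i = false := by
      have := hst
      simp only [pvStopped, List.any_cons, Bool.or_eq_false_iff] at this
      exact this.2
    by_cases hl : x.2.length ≤ i
    · rw [if_pos hl] at h'; exact absurd h' (by simp)
    · rw [if_neg hl, hs, Bool.false_or] at h'
      exact ih h' hrest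

-- ---- A-side: characterise the inner loop ----
lemma pvAInner_eq (patterns : List String) (i : Nat) :
    ∀ (entries : List (String × List String)) (d : PySem.Dict String String),
    pvColOK (entries.filter (fun p => patterns.contains p.1)) i = true →
    pvAInner patterns i entries d =
      match pvRow (entries.filter (fun p => patterns.contains p.1)) i with
      | none => d
      | some w => d.insert (PySem.Int.toStr (i : Int)) w := by
  intro entries
  induction entries with
  | nil => intro d _; simp [pvAInner, pvRow]
  | cons e rest ih =>
    intro d hok
    obtain ⟨k, outcomes⟩ := e
    by_cases hk : patterns.contains k = true
    · rw [List.filter_cons, pvIfB_pos hk] at hok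
      have hok' : (if outcomes.length ≤ i then false
          else (pvStop (pvOut (k, outcomes) i)
            || pvColOK (rest.filter (fun p => patterns.contains p.1)) i)) = true := hok
      have hilt : i < outcomes.length := by
        by_cases hl : outcomes.length ≤ i
        · rw [if_pos hl] at hok'; exact absurd hok' (by simp)
        · omega
      rw [if_neg (by omega)] at hok'
      have hget : PySem.List.pyGet? outcomes (i : Int) = some (outcomes.getD i "") := by
        rw [PySem.List.pyGet?_natCast, List.getElem?_eq_getElem hilt,
          List.getD_eq_getElem?_getD, List.getElem?_eq_getElem hilt]
        rfl
      have hout : pvOut (k, outcomes) i = outcomes.getD i "" := rfl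
      simp only [pvAInner, pvIfB_pos hk, hget, List.filter_cons, pvIfB_pos hk, pvRow, hout]
      by_cases htp : (outcomes.getD i "" == "TP") = true
      · have hstp : pvStop (outcomes.getD i "") = true := by
          simp only [pvStop, htp, Bool.true_or]
        simp only [pvIfB_pos htp, pvIfB_pos hstp]
        rw [eq_of_beq htp]
      · by_cases hfp : (outcomes.getD i "" == "FP") = true
        · have hstp : pvStop (outcomes.getD i "") = true := by
            simp only [pvStop, hfp, Bool.or_true]
          simp only [pvIfB_neg (pvBfalse htp), pvIfB_pos hfp, pvIfB_pos hstp]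
          rw [eq_of_beq hfp]
        · have hns : pvStop (outcomes.getD i "") = false := by
            simp only [pvStop, pvBfalse htp, pvBfalse hfp, Bool.or_false]
          have hrest : pvColOK (rest.filter (fun p => patterns.contains p.1)) i = true := by
            rw [hout, hns, Bool.false_or] at hok'
            exact hok'
          simp only [pvIfB_neg (pvBfalse htp), pvIfB_neg (pvBfalse hfp), pvIfB_neg hns]
          rw [ih _ hrest]
          cases hr : pvRow (List.filter (fun p => patterns.contains p.1) rest) i with
          | none => simp only [hr]
          | some w => simp only [hr, PySem.Dict.insert_insert_self]
    · have hkf := pvBfalse hk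
      rw [List.filter_cons, pvIfB_neg hkf] at hok
      simp only [pvAInner, pvIfB_neg hkf, List.filter_cons, pvIfB_neg hkf]
      exact ih d hok

-- ---- B-side: one full pass of pvBStep over a list of fresh indices ----
lemma pvBPass_fresh (outcomes : List String) :
    ∀ (l : List Nat) (d : PySem.Dict String String) (fin : PySem.Set Nat),
    l.Nodup →
    (∀ i ∈ l, i < outcomes.length) →
    (∀ i ∈ l, d.contains (PySem.Int.toStr (i : Int)) = false) →
    (∀ i ∈ l, i ∉ fin) →
    (l.foldl (pvBStep outcomes) (d, fin)).1.items
        = d.items ++ l.map (fun i : Nat => (PySem.Int.toStr (i : Int), outcomes.getD i "")) ∧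
    (∀ j, j ∈ (l.foldl (pvBStep outcomes) (d, fin)).2
        ↔ j ∈ fin ∨ (j ∈ l ∧ pvStop (outcomes.getD j "") = true)) := by
  intro l
  induction l with
  | nil =>
    intro d fin _ _ _ _
    constructor
    · simp
    · intro j; simp
  | cons i rest ih =>
    intro d fin hnd hlen hfree hfin
    have hilt : i < outcomes.length := hlen i (by simp)
    have hget : PySem.List.pyGet? outcomes (i : Int) = some (outcomes.getD i "") := by
      rw [PySem.List.pyGet?_natCast, List.getElem?_eq_getElem hilt,
        List.getD_eq_getElem?_getD, List.getElem?_eq_getElem hilt]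
      rfl
    have hnc : PySem.Set.contains fin i = false := by
      by_contra hc
      exact hfin i (by simp) ((PySem.Set.contains_iff fin i).mp (by
        cases hcc : PySem.Set.contains fin i
        · exact absurd hcc hc
        · rfl))
    have hdc : d.contains (PySem.Int.toStr (i : Int)) = false := hfree i (by simp)
    have hnd' : rest.Nodup := (List.nodup_cons.mp hnd).2
    have hni : i ∉ rest := (List.nodup_cons.mp hnd).1
    by_cases hs : pvStop (outcomes.getD i "") = true
    · have hs' : (outcomes.getD i "" == "TP" || outcomes.getD i "" == "FP") = true := hs
      have hstep : pvBStep outcomes (d, fin) i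
          = (d.insert (PySem.Int.toStr (i : Int)) (outcomes.getD i ""), PySem.Set.add fin i) := by
        simp only [pvBStep, hget, pvIfB_neg hnc, pvIfB_pos hs']
      have hfree' : ∀ j ∈ rest,
          (d.insert (PySem.Int.toStr (i : Int)) (outcomes.getD i "")).contains
            (PySem.Int.toStr (j : Int)) = false := by
        intro j hj
        rw [PySem.Dict.contains_insert, pvToStr_beq]
        have hji : ¬ (j = i) := fun hh => hni (hh ▸ hj)
        simp only [hji, decide_false, Bool.false_or]
        exact hfree j (List.mem_cons_of_mem _ hj)
      have hfin' : ∀ j ∈ rest, j ∉ PySem.Set.add fin i := by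
        intro j hj hmem
        rcases (PySem.Set.mem_add fin i j).mp hmem with hcc | hcc
        · exact hfin j (List.mem_cons_of_mem _ hj) hcc
        · exact hni (hcc ▸ hj)
      obtain ⟨hit, hmem⟩ := ih _ _ hnd' (fun j hj => hlen j (List.mem_cons_of_mem _ hj))
        hfree' hfin'
      constructor
      · simp only [List.foldl_cons, hstep]
        rw [hit, PySem.Dict.items_insert_of_not_contains d _ hdc]
        simp
      · intro j
        simp only [List.foldl_cons, hstep]
        rw [hmem j, PySem.Set.mem_add]
        constructor
        · rintro ((hcc | hcc) | ⟨h1, h2⟩)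
          · exact Or.inl hcc
          · exact Or.inr ⟨by simp [hcc], by rw [hcc]; exact hs⟩
          · exact Or.inr ⟨List.mem_cons_of_mem _ h1, h2⟩
        · rintro (hcc | ⟨h1, h2⟩)
          · exact Or.inl (Or.inl hcc)
          · rcases List.mem_cons.mp h1 with hcc | hcc
            · exact Or.inl (Or.inr hcc)
            · exact Or.inr ⟨hcc, h2⟩
    · have hs' : (outcomes.getD i "" == "TP" || outcomes.getD i "" == "FP") = false :=
        pvBfalse hs
      have hstep : pvBStep outcomes (d, fin) i
          = (d.insert (PySem.Int.toStr (i : Int)) (outcomes.getD i ""), fin) := by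
        simp only [pvBStep, hget, pvIfB_neg hnc, pvIfB_neg hs']
      have hfree' : ∀ j ∈ rest,
          (d.insert (PySem.Int.toStr (i : Int)) (outcomes.getD i "")).contains
            (PySem.Int.toStr (j : Int)) = false := by
        intro j hj
        rw [PySem.Dict.contains_insert, pvToStr_beq]
        have hji : ¬ (j = i) := fun hh => hni (hh ▸ hj)
        simp only [hji, decide_false, Bool.false_or]
        exact hfree j (List.mem_cons_of_mem _ hj)
      obtain ⟨hit, hmem⟩ := ih _ _ hnd' (fun j hj => hlen j (List.mem_cons_of_mem _ hj))
        hfree' (fun j hj => hfin j (List.mem_cons_of_mem _ hj))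
      constructor
      · simp only [List.foldl_cons, hstep]
        rw [hit, PySem.Dict.items_insert_of_not_contains d _ hdc]
        simp
      · intro j
        simp only [List.foldl_cons, hstep]
        rw [hmem j]
        constructor
        · rintro (hcc | ⟨h1, h2⟩)
          · exact Or.inl hcc
          · exact Or.inr ⟨List.mem_cons_of_mem _ h1, h2⟩
        · rintro (hcc | ⟨h1, h2⟩)
          · exact Or.inl hcc
          · rcases List.mem_cons.mp h1 with hcc | hcc
            · exfalso
              rw [hcc] at h2
              rw [h2] at hs
              exact hs rfl
            · exact Or.inr ⟨hcc, h2⟩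

-- ---- B-side: one full pass of pvBStep over indices whose keys are already present ----
lemma pvBPass_update (outcomes : List String) (n : Nat) :
    ∀ (l : List Nat) (w : Nat → String) (d : PySem.Dict String String) (fin : PySem.Set Nat),
    l.Nodup →
    (∀ i ∈ l, i < n) →
    (∀ i ∈ l, i ∉ fin → i < outcomes.length) →
    d.items = (List.range n).map (fun i : Nat => (PySem.Int.toStr (i : Int), w i)) →
    (l.foldl (pvBStep outcomes) (d, fin)).1.items
        = (List.range n).map (fun i : Nat => (PySem.Int.toStr (i : Int),
            if i ∈ l ∧ i ∉ fin then outcomes.getD i "" else w i)) ∧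
    (∀ j, j ∈ (l.foldl (pvBStep outcomes) (d, fin)).2
        ↔ j ∈ fin ∨ (j ∈ l ∧ j ∉ fin ∧ pvStop (outcomes.getD j "") = true)) := by
  intro l
  induction l with
  | nil =>
    intro w d fin _ _ _ hd
    constructor
    · simp only [List.foldl_nil]
      rw [hd]
      apply List.map_congr_left
      intro i _
      simp
    · intro j; simp
  | cons i rest ih =>
    intro w d fin hnd hln hlen hd
    have hiltn : i < n := hln i (by simp)
    have hnd' : rest.Nodup := (List.nodup_cons.mp hnd).2
    have hni : i ∉ rest := (List.nodup_cons.mp hnd).1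
    have hdc : d.contains (PySem.Int.toStr (i : Int)) = true := by
      rw [PySem.Dict.contains_iff_mem_keys]
      have hmm : (PySem.Int.toStr (i : Int), w i) ∈ d.items := by
        rw [hd]
        exact List.mem_map.mpr ⟨i, List.mem_range.mpr hiltn, rfl⟩
      have hk : PySem.Int.toStr (i : Int) ∈ d.items.map Prod.fst :=
        List.mem_map.mpr ⟨_, hmm, rfl⟩
      simpa [PySem.Dict.keys] using hk
    by_cases hfi : i ∈ fin
    · -- skipped: index already finalized
      have hc : PySem.Set.contains fin i = true := (PySem.Set.contains_iff fin i).mpr hfi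
      have hstep : pvBStep outcomes (d, fin) i = (d, fin) := by
        simp only [pvBStep, pvIfB_pos hc]
      obtain ⟨hit, hmem⟩ := ih w d fin hnd' (fun j hj => hln j (List.mem_cons_of_mem _ hj))
        (fun j hj => hlen j (List.mem_cons_of_mem _ hj)) hd
      constructor
      · simp only [List.foldl_cons, hstep]
        rw [hit]
        apply List.map_congr_left
        intro q _
        by_cases hq : q = i
        · subst hq
          have c1 : ¬ (q ∈ rest ∧ q ∉ fin) := fun hh => hh.2 hfi
          have c2 : ¬ (q ∈ q :: rest ∧ q ∉ fin) := fun hh => hh.2 hfi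
          rw [if_neg c1, if_neg c2]
        · have hiff : (q ∈ rest ∧ q ∉ fin) ↔ (q ∈ i :: rest ∧ q ∉ fin) := by
            constructor
            · rintro ⟨h1, h2⟩; exact ⟨List.mem_cons_of_mem _ h1, h2⟩
            · rintro ⟨h1, h2⟩
              rcases List.mem_cons.mp h1 with hcc | hcc
              · exact absurd hcc hq
              · exact ⟨hcc, h2⟩
          by_cases hqq : q ∈ rest ∧ q ∉ fin
          · rw [if_pos hqq, if_pos (hiff.mp hqq)]
          · rw [if_neg hqq, if_neg (fun hh => hqq (hiff.mpr hh))]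
      · intro j
        simp only [List.foldl_cons, hstep]
        rw [hmem j]
        constructor
        · rintro (hcc | ⟨h1, h2, h3⟩)
          · exact Or.inl hcc
          · exact Or.inr ⟨List.mem_cons_of_mem _ h1, h2, h3⟩
        · rintro (hcc | ⟨h1, h2, h3⟩)
          · exact Or.inl hcc
          · rcases List.mem_cons.mp h1 with hcc | hcc
            · exact absurd (hcc ▸ hfi) h2
            · exact Or.inr ⟨hcc, h2, h3⟩
    · -- not finalized: overwrite the key in place
      have hilt : i < outcomes.length := hlen i (by simp) hfi
      have hget : PySem.List.pyGet? outcomes (i : Int) = some (outcomes.getD i "") := by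
        rw [PySem.List.pyGet?_natCast, List.getElem?_eq_getElem hilt,
          List.getD_eq_getElem?_getD, List.getElem?_eq_getElem hilt]
        rfl
      have hc : PySem.Set.contains fin i = false := by
        cases hcc : PySem.Set.contains fin i
        · rfl
        · exact absurd ((PySem.Set.contains_iff fin i).mp hcc) hfi
      by_cases hs : pvStop (outcomes.getD i "") = true
      · have hs' : (outcomes.getD i "" == "TP" || outcomes.getD i "" == "FP") = true := hs
        have hstep : pvBStep outcomes (d, fin) i
            = (d.insert (PySem.Int.toStr (i : Int)) (outcomes.getD i ""), PySem.Set.add fin i) := by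
          simp only [pvBStep, hget, pvIfB_neg hc, pvIfB_pos hs']
        have hd' : (d.insert (PySem.Int.toStr (i : Int)) (outcomes.getD i "")).items
            = (List.range n).map (fun q : Nat => (PySem.Int.toStr (q : Int),
                if q = i then outcomes.getD i "" else w q)) := by
          rw [PySem.Dict.items_insert_of_contains d _ hdc, hd, List.map_map]
          apply List.map_congr_left
          intro q _
          simp only [Function.comp_apply, pvToStr_beq]
          by_cases hq : q = i
          · subst hq; simp
          · simp [hq]
        have hlen' : ∀ j ∈ rest, j ∉ PySem.Set.add fin i → j < outcomes.length := by
          intro j hj hjf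
          exact hlen j (List.mem_cons_of_mem _ hj)
            (fun hcc => hjf ((PySem.Set.mem_add fin i j).mpr (Or.inl hcc)))
        obtain ⟨hit, hmem⟩ := ih (fun q => if q = i then outcomes.getD i "" else w q) _ _
          hnd' (fun j hj => hln j (List.mem_cons_of_mem _ hj)) hlen' hd'
        constructor
        · simp only [List.foldl_cons, hstep]
          rw [hit]
          apply List.map_congr_left
          intro q _
          by_cases hq : q = i
          · subst hq
            have c1 : ¬ (q ∈ rest ∧ q ∉ PySem.Set.add fin q) := fun hh => hni hh.1
            have c2 : (q ∈ q :: rest ∧ q ∉ fin) := ⟨by simp, hfi⟩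
            rw [if_neg c1, if_pos c2, if_pos rfl]
          · have hiff : (q ∈ rest ∧ q ∉ PySem.Set.add fin i) ↔ (q ∈ i :: rest ∧ q ∉ fin) := by
              constructor
              · rintro ⟨h1, h2⟩
                refine ⟨List.mem_cons_of_mem _ h1, fun hcc => h2 ?_⟩
                exact (PySem.Set.mem_add fin i q).mpr (Or.inl hcc)
              · rintro ⟨h1, h2⟩
                rcases List.mem_cons.mp h1 with hcc | hcc
                · exact absurd hcc hq
                · refine ⟨hcc, fun hcc2 => ?_⟩
                  rcases (PySem.Set.mem_add fin i q).mp hcc2 with hcc3 | hcc3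
                  · exact h2 hcc3
                  · exact hq hcc3
            by_cases hqq : q ∈ i :: rest ∧ q ∉ fin
            · rw [if_pos (hiff.mpr hqq), if_pos hqq]
            · rw [if_neg (fun hh => hqq (hiff.mp hh)), if_neg hqq, if_neg hq]
        · intro j
          simp only [List.foldl_cons, hstep]
          rw [hmem j]
          constructor
          · rintro (hcc | ⟨h1, h2, h3⟩)
            · rcases (PySem.Set.mem_add fin i j).mp hcc with hcc2 | hcc2
              · exact Or.inl hcc2
              · exact Or.inr ⟨by simp [hcc2], hcc2 ▸ hfi, by rw [hcc2]; exact hs⟩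
            · have h2' : j ∉ fin := fun hcc2 =>
                h2 ((PySem.Set.mem_add fin i j).mpr (Or.inl hcc2))
              exact Or.inr ⟨List.mem_cons_of_mem _ h1, h2', h3⟩
          · rintro (hcc | ⟨h1, h2, h3⟩)
            · exact Or.inl ((PySem.Set.mem_add fin i j).mpr (Or.inl hcc))
            · rcases List.mem_cons.mp h1 with hcc | hcc
              · exact Or.inl ((PySem.Set.mem_add fin i j).mpr (Or.inr hcc))
              · refine Or.inr ⟨hcc, fun hcc2 => ?_, h3⟩
                rcases (PySem.Set.mem_add fin i j).mp hcc2 with hcc3 | hcc3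
                · exact h2 hcc3
                · exact hni (hcc3 ▸ hcc)
      · have hs' : (outcomes.getD i "" == "TP" || outcomes.getD i "" == "FP") = false :=
          pvBfalse hs
        have hstep : pvBStep outcomes (d, fin) i
            = (d.insert (PySem.Int.toStr (i : Int)) (outcomes.getD i ""), fin) := by
          simp only [pvBStep, hget, pvIfB_neg hc, pvIfB_neg hs']
        have hd' : (d.insert (PySem.Int.toStr (i : Int)) (outcomes.getD i "")).items
            = (List.range n).map (fun q : Nat => (PySem.Int.toStr (q : Int),
                if q = i then outcomes.getD i "" else w q)) := by
          rw [PySem.Dict.items_insert_of_contains d _ hdc, hd, List.map_map]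
          apply List.map_congr_left
          intro q _
          simp only [Function.comp_apply, pvToStr_beq]
          by_cases hq : q = i
          · subst hq; simp
          · simp [hq]
        obtain ⟨hit, hmem⟩ := ih (fun q => if q = i then outcomes.getD i "" else w q) _ _
          hnd' (fun j hj => hln j (List.mem_cons_of_mem _ hj))
          (fun j hj => hlen j (List.mem_cons_of_mem _ hj)) hd'
        constructor
        · simp only [List.foldl_cons, hstep]
          rw [hit]
          apply List.map_congr_left
          intro q _
          by_cases hq : q = i
          · subst hq
            have c1 : ¬ (q ∈ rest ∧ q ∉ fin) := fun hh => hni hh.1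
            have c2 : (q ∈ q :: rest ∧ q ∉ fin) := ⟨by simp, hfi⟩
            rw [if_neg c1, if_pos c2, if_pos rfl]
          · have hiff : (q ∈ rest ∧ q ∉ fin) ↔ (q ∈ i :: rest ∧ q ∉ fin) := by
              constructor
              · rintro ⟨h1, h2⟩; exact ⟨List.mem_cons_of_mem _ h1, h2⟩
              · rintro ⟨h1, h2⟩
                rcases List.mem_cons.mp h1 with hcc | hcc
                · exact absurd hcc hq
                · exact ⟨hcc, h2⟩
            by_cases hqq : q ∈ i :: rest ∧ q ∉ fin
            · rw [if_pos (hiff.mpr hqq), if_pos hqq]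
            · rw [if_neg (fun hh => hqq (hiff.mp hh)), if_neg hqq, if_neg hq]
        · intro j
          simp only [List.foldl_cons, hstep]
          rw [hmem j]
          constructor
          · rintro (hcc | ⟨h1, h2, h3⟩)
            · exact Or.inl hcc
            · exact Or.inr ⟨List.mem_cons_of_mem _ h1, h2, h3⟩
          · rintro (hcc | ⟨h1, h2, h3⟩)
            · exact Or.inl hcc
            · rcases List.mem_cons.mp h1 with hcc | hcc
              · exfalso
                rw [hcc] at h3
                rw [h3] at hs
                exact hs rfl
              · exact Or.inr ⟨hcc, h2, h3⟩

-- ---- B-side: the outer fold over the matching entries ----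
lemma pvBOuter (n : Nat) :
    ∀ (es : List (String × List String)), es ≠ [] →
    (∀ i < n, pvColOK es i = true) →
    (es.foldl (fun st p => pvBInner n p.2 st)
        (PySem.Dict.empty, (PySem.Set.empty : PySem.Set Nat))).1.items
      = (List.range n).map (fun i : Nat => (PySem.Int.toStr (i : Int), pvVal es i)) ∧
    (∀ j, j ∈ (es.foldl (fun st p => pvBInner n p.2 st)
        (PySem.Dict.empty, (PySem.Set.empty : PySem.Set Nat))).2
      ↔ j < n ∧ pvStopped es j = true) := by
  intro es
  induction es using List.reverseRecOn with
  | nil => intro h; exact absurd rfl h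
  | append_singleton es e ih =>
    intro _ hok
    by_cases hes : es = []
    · subst hes
      simp only [List.nil_append, List.foldl_cons, List.foldl_nil]
      have hlen' : ∀ i ∈ List.range n, i < e.2.length := by
        intro i hi
        exact pvColOK_last e i [] (hok i (List.mem_range.mp hi)) rfl
      obtain ⟨hit, hmem⟩ := pvBPass_fresh e.2 (List.range n) PySem.Dict.empty PySem.Set.empty
        List.nodup_range hlen'
        (fun i _ => PySem.Dict.contains_empty _)
        (fun i _ hmem => by simp [PySem.Set.empty] at hmem)
      constructor
      · rw [pvBInner, hit]
        have hemp : PySem.Dict.empty.items = ([] : List (String × String)) := rfl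
        rw [hemp, List.nil_append]
        apply List.map_congr_left
        intro i _
        have hv : pvVal [e] i = pvOut e i := by
          simp [pvVal, pvRow_single]
        rw [hv]
        rfl
      · intro j
        rw [pvBInner, hmem j]
        have hemp : (j ∈ (PySem.Set.empty : PySem.Set Nat)) ↔ False := by
          simp [PySem.Set.empty]
        rw [hemp]
        simp only [false_or, List.mem_range]
        constructor
        · rintro ⟨h1, h2⟩
          exact ⟨h1, by simpa [pvStopped, pvOut] using h2⟩
        · rintro ⟨h1, h2⟩
          exact ⟨h1, by simpa [pvStopped, pvOut] using h2⟩
    · have hok' : ∀ i < n, pvColOK es i = true :=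
        fun i hi => pvColOK_append_left e i es (hok i hi)
      obtain ⟨hit, hmem⟩ := ih hes hok'
      rw [List.foldl_append]
      simp only [List.foldl_cons, List.foldl_nil]
      set st := es.foldl (fun st p => pvBInner n p.2 st)
        (PySem.Dict.empty, (PySem.Set.empty : PySem.Set Nat)) with hst
      have hb : pvBInner n e.2 st = (List.range n).foldl (pvBStep e.2) (st.1, st.2) := by
        rw [pvBInner]
      have hlen'' : ∀ i ∈ List.range n, i ∉ st.2 → i < e.2.length := by
        intro i hi hni
        have hin : i < n := List.mem_range.mp hi
        have hns : pvStopped es i = false := by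
          apply pvBfalse
          intro hcc
          exact hni ((hmem i).mpr ⟨hin, hcc⟩)
        exact pvColOK_last e i es (hok i hin) hns
      obtain ⟨hit2, hmem2⟩ := pvBPass_update e.2 n (List.range n) (fun i => pvVal es i)
        st.1 st.2 List.nodup_range (fun i hi => List.mem_range.mp hi) hlen'' hit
      constructor
      · rw [hb, hit2]
        apply List.map_congr_left
        intro i hi
        have hin : i < n := List.mem_range.mp hi
        have hfin : i ∈ st.2 ↔ pvStopped es i = true := by
          rw [hmem i]
          constructor
          · rintro ⟨_, hcc⟩; exact hcc
          · intro hcc; exact ⟨hin, hcc⟩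
        rw [pvVal_append es e i hes]
        by_cases hsp : pvStopped es i = true
        · have c1 : ¬ (i ∈ List.range n ∧ i ∉ st.2) := fun hh => hh.2 (hfin.mpr hsp)
          rw [if_neg c1, pvIfB_pos hsp]
        · have c1 : (i ∈ List.range n ∧ i ∉ st.2) := ⟨hi, fun hh => hsp (hfin.mp hh)⟩
          rw [if_pos c1, pvIfB_neg (pvBfalse hsp)]
          rfl
      · intro j
        rw [hb, hmem2 j, pvStopped_append]
        constructor
        · rintro (hcc | ⟨h1, h2, h3⟩)
          · obtain ⟨hlt, hstp⟩ := (hmem j).mp hcc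
            exact ⟨hlt, by simp [hstp]⟩
          · have h3' : pvStop (pvOut e j) = true := h3
            exact ⟨List.mem_range.mp h1, by simp [h3']⟩
        · rintro ⟨h1, h2⟩
          rcases Bool.or_eq_true_iff.mp h2 with hcc | hcc
          · exact Or.inl ((hmem j).mpr ⟨h1, hcc⟩)
          · by_cases hj : j ∈ st.2
            · exact Or.inl hj
            · exact Or.inr ⟨List.mem_range.mpr h1, hj, hcc⟩

-- trivial fold
lemma pvFoldlConst (l : List Nat) (d : PySem.Dict String String) :
    l.foldl (fun d _ => d) d = d := by
  induction l with
  | nil => rfl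
  | cons x xs ih => simpa using ih

-- ---- main theorem ----
theorem pv_main (patterns : List String) (outcomes_d : List (String × List String))
    (hpre : Pre_get_group_predictions patterns outcomes_d) :
    get_group_predictions patterns outcomes_d = get_group_predictions_alt patterns outcomes_d := by
  obtain ⟨hne, hfor⟩ := hpre
  match outcomes_d with
  | [] => exact absurd rfl hne
  | (k0, v0) :: restd =>
    set od := (k0, v0) :: restd with hod
    set n := v0.length with hn
    set es := od.filter (fun p => patterns.contains p.1) with hes
    have hfor' : ∀ i < n, ∀ j < es.length, (es[j]!).2.length ≤ i →
        ∃ j' < j, i < (es[j']!).2.length ∧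
          ((es[j']!).2.getD i "" = "TP" ∨ (es[j']!).2.getD i "" = "FP") := by
      intro i hi
      exact hfor i hi
    have hok : ∀ i < n, pvColOK es i = true :=
      fun i hi => pvPre_to_colOK i es (hfor' i hi)
    have hA : get_group_predictions patterns od =
        ((List.range n).foldl (fun d i =>
          match pvRow es i with
          | none => d
          | some w => d.insert (PySem.Int.toStr (i : Int)) w) PySem.Dict.empty).items := by
      show ((List.range n).foldl (fun d index => pvAInner patterns index od d)
        PySem.Dict.empty).items = _
      refine congrArg PySem.Dict.items ?_
      apply PySem.List.foldl_congr_mem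
      intro acc i hi
      exact pvAInner_eq patterns i od acc (hok i (List.mem_range.mp hi))
    have hB : get_group_predictions_alt patterns od =
        (es.foldl (fun st p => pvBInner n p.2 st)
          (PySem.Dict.empty, (PySem.Set.empty : PySem.Set Nat))).1.items := by
      show (od.foldl (fun st p => if patterns.contains p.1 then pvBInner n p.2 st else st)
        (PySem.Dict.empty, (PySem.Set.empty : PySem.Set Nat))).1.items = _
      rw [hes, List.foldl_filter]
    rw [hA, hB]
    by_cases hesnil : es = []
    · rw [hesnil]
      have hstep : ∀ (acc : PySem.Dict String String), ∀ i ∈ List.range n,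
          (match pvRow ([] : List (String × List String)) i with
           | none => acc
           | some w => acc.insert (PySem.Int.toStr (i : Int)) w) = acc := by
        intro acc i _
        simp [pvRow]
      rw [PySem.List.foldl_congr_mem (List.range n) _ (fun d _ => d) PySem.Dict.empty hstep,
        pvFoldlConst]
      rfl
    · have hrow : ∀ i, pvRow es i = some (pvVal es i) := fun i => pvRow_eq_some es i hesnil
      have hA2 : ((List.range n).foldl (fun d i =>
          match pvRow es i with
          | none => d
          | some w => d.insert (PySem.Int.toStr (i : Int)) w) PySem.Dict.empty).items
          = (List.range n).map (fun i : Nat => (PySem.Int.toStr (i : Int), pvVal es i)) := by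
        rw [PySem.List.foldl_congr_mem (List.range n) _
          (fun d (i : Nat) => d.insert (PySem.Int.toStr (i : Int)) (pvVal es i)) PySem.Dict.empty
          (fun acc i _ => by rw [hrow i])]
        rw [PySem.Dict.items_foldl_insert_fresh (List.range n)
          (fun i : Nat => PySem.Int.toStr (i : Int)) (fun i => pvVal es i) PySem.Dict.empty
          (fun i _ => PySem.Dict.contains_empty _) (pvKeys_nodup n)]
        rfl
      rw [hA2, (pvBOuter n es hesnil hok).1]

-- ===== VERDICT (by name: the statement is the Claim_ definition above) =====
theorem get_group_predictions_spec : Claim_equal_get_group_predictions := by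
  intro patterns outcomes_d _ hpre
  unfold Spec_get_group_predictions
  exact pv_main patterns outcomes_d hpre
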